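-- pv_equiv track=rewrite | github.com/qwzx-qwas/cs61a | hw03/hw03/hw03.py | digit_distance
-- ===== SOURCE A (Python) =====
-- def digit_distance(n):
--     """Determines the digit distance of n.
--
--     >>> digit_distance(3)
--     0
--     >>> digit_distance(777) # 0 + 0
--     0
--     >>> digit_distance(314) # 2 + 3
--     5
--     >>> digit_distance(31415926535) # 2 + 3 + 3 + 4 + ... + 2
--     32
--     >>> digit_distance(3464660003)  # 1 + 2 + 2 + 2 + ... + 3
--     16
--     >>> from construct_check import check
--     >>> # ban all loops
--     >>> check(HW_SOURCE_FILE, 'digit_distance',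
--     ...       ['For', 'While'])
--     True
--     """
--     "*** YOUR CODE HERE ***"
--     sum = 0
--     def calculate(n):
--         return abs(n % 10 - (n // 10) % 10)
--     if n < 10:
--         return 0 + sum
--     elif 10 < n < 100:
--         return sum + calculate(n)
--     else:
--         sum = calculate(n)
--         return sum + digit_distance(n // 10)
-- ===== SOURCE B (Python) =====
-- def digit_distance(n):
--     if n < 10:
--         return 0
--     digits = []
--     while n:
--         digits.append(n % 10)
--         n //= 10
--     total = 0
--     for a, b in zip(digits, digits[1:]):
--         total += abs(a - b)
--     return total
-- ===== Notes on version B (the rewrite author's own statement) =====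
-- stated objective: alternative
-- what changed: Replaces A's three-branch recursion (with its redundant two-digit case) by materialising the digit list with one while loop and then summing |a-b| over adjacent pairs with zip.
import Mathlib
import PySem

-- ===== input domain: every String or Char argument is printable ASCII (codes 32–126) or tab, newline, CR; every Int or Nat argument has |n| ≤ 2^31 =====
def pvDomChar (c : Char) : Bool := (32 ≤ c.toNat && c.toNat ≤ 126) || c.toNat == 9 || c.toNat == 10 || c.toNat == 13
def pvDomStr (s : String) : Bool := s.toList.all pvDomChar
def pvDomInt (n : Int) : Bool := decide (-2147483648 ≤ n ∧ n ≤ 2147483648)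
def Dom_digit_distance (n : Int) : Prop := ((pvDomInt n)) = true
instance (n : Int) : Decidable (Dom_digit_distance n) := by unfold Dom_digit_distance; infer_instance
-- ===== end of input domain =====

-- B replaces A's three-branch recursion by building the digit list and summing |a-b| over adjacent pairs (alternative decomposition, same cost).

-- ===== PORT A =====
def pvCalculate (n : Int) : Int :=
  |PySem.Int.mod n 10 - PySem.Int.mod (PySem.Int.floordiv n 10) 10|

def digit_distance (n : Int) : Int :=
  if n < 10 then 0 + 0
  else if 10 < n ∧ n < 100 then 0 + pvCalculate n
  else pvCalculate n + digit_distance (PySem.Int.floordiv n 10)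
termination_by n.toNat
decreasing_by
  rename_i h1 _
  rw [PySem.Int.floordiv_eq_ediv_of_pos (by omega : (0:Int) < 10)]
  omega

-- ===== PORT B =====
-- the while loop of Source B; it is only entered with n ≥ 10, where Python's `while n` is `while n > 0`
def pvDigits (n : Int) : List Int :=
  if 0 < n then PySem.Int.mod n 10 :: pvDigits (PySem.Int.floordiv n 10) else []
termination_by n.toNat
decreasing_by
  rw [PySem.Int.floordiv_eq_ediv_of_pos (by omega : (0:Int) < 10)]
  omega

def digit_distance_alt (n : Int) : Int :=
  if n < 10 then 0
  else
    let digits := pvDigits n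
    -- zip(digits, digits[1:]): digits[1:] is digits.drop 1
    (digits.zip (digits.drop 1)).foldl (fun total p => total + |p.1 - p.2|) 0

-- ===== PRECONDITION & SPEC =====
def Spec_digit_distance (n : Int) (out : Int) : Prop := out = digit_distance_alt n
instance (n : Int) (out : Int) : Decidable (Spec_digit_distance n out) := by unfold Spec_digit_distance; infer_instance

-- ===== CLAIM (what is proved, stated in full; the proofs are below) =====
def Claim_equal_digit_distance : Prop := ∀ (n : Int), Dom_digit_distance n → Spec_digit_distance n (digit_distance n)

-- ===== LEMMAS AND PROOFS =====

def pvPairSum (l : List Int) : Int :=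
  ((l.zip (l.drop 1)).map (fun p => |p.1 - p.2|)).sum

lemma pvDigits_pos (n : Int) (h : 0 < n) :
    pvDigits n = PySem.Int.mod n 10 :: pvDigits (PySem.Int.floordiv n 10) := by
  rw [pvDigits]; simp [h]

lemma pvDigits_nonpos (n : Int) (h : ¬ 0 < n) : pvDigits n = [] := by
  rw [pvDigits]; simp [h]

lemma pvPairSum_cons_cons (a b : Int) (t : List Int) :
    pvPairSum (a :: b :: t) = |a - b| + pvPairSum (b :: t) := by
  simp [pvPairSum]

lemma pvMod_eq (a : Int) : PySem.Int.mod a 10 = a % 10 :=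
  PySem.Int.mod_eq_emod_of_pos (by omega)

lemma pvDiv_eq (a : Int) : PySem.Int.floordiv a 10 = a / 10 :=
  PySem.Int.floordiv_eq_ediv_of_pos (by omega)

lemma pvMain (N : Nat) : ∀ n : Int, n.toNat ≤ N → 10 ≤ n →
    digit_distance n = pvPairSum (pvDigits n) := by
  induction N with
  | zero => intro n hN h10; omega
  | succ N ih =>
    intro n hN h10
    have hq9 : 1 ≤ n / 10 := by omega
    have hdig : pvDigits n = n % 10 :: pvDigits (n / 10) := by
      rw [pvDigits_pos n (by omega), pvMod_eq, pvDiv_eq]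
    by_cases hsmall : n < 100
    · -- two digits: n / 10 is a single digit
      have hq : n / 10 < 10 := by omega
      have hd2 : pvDigits (n / 10) = n / 10 :: pvDigits (n / 10 / 10) := by
        rw [pvDigits_pos _ (by omega), pvMod_eq, pvDiv_eq, Int.emod_eq_of_lt (by omega) hq]
      have hd3 : pvDigits (n / 10 / 10) = [] := by
        rw [pvDigits_nonpos]; omega
      rw [hdig, hd2, hd3, pvPairSum_cons_cons]
      have hcalc : pvCalculate n = |n % 10 - n / 10| := by
        simp [pvCalculate, Int.emod_eq_of_lt (by omega) hq]
      by_cases h10' : 10 < n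
      · rw [digit_distance, if_neg (show ¬ n < 10 by omega),
            if_pos (show 10 < n ∧ n < 100 from ⟨h10', hsmall⟩), hcalc]
        simp [pvPairSum]
      · -- n = 10: A takes the else branch; digit_distance 1 = 0
        have hn10 : n = 10 := by omega
        subst hn10
        rw [digit_distance, if_neg (show ¬ (10:Int) < 10 by omega),
            if_neg (show ¬ ((10:Int) < 10 ∧ (10:Int) < 100) by omega)]
        have h1 : digit_distance (PySem.Int.floordiv 10 10) = 0 := by
          rw [pvDiv_eq]
          norm_num
          rw [digit_distance]
          norm_num
        rw [h1]
        simp [pvCalculate, pvPairSum]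
    · -- n ≥ 100
      rw [digit_distance]
      simp only [if_neg (by omega : ¬ n < 10), if_neg (by omega : ¬ (10 < n ∧ n < 100))]
      have hrec := ih (PySem.Int.floordiv n 10) (by rw [pvDiv_eq]; omega)
        (by rw [pvDiv_eq]; omega)
      rw [hrec, pvDiv_eq]
      have hhead : pvDigits (n / 10) = (n / 10) % 10 :: pvDigits (n / 10 / 10) := by
        rw [pvDigits_pos _ (by omega), pvMod_eq, pvDiv_eq]
      rw [hdig, hhead, pvPairSum_cons_cons, ← hhead]
      have hcalc : pvCalculate n = |n % 10 - (n / 10) % 10| := by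
        simp [pvCalculate]
      rw [hcalc]

lemma pvFoldl_abs (l : List (Int × Int)) (c : Int) :
    l.foldl (fun total p => total + |p.1 - p.2|) c
      = c + (l.map (fun p => |p.1 - p.2|)).sum := by
  induction l generalizing c with
  | nil => simp
  | cons x t ih => simp [List.foldl, ih]; ring

-- ===== VERDICT (by name: the statement is the Claim_ definition above) =====
theorem digit_distance_spec : Claim_equal_digit_distance := by
  intro n _
  unfold Spec_digit_distance digit_distance_alt
  by_cases h : n < 10
  · rw [digit_distance]; simp [h]
  · simp only [if_neg h]
    rw [pvMain n.toNat n le_rfl (by omega), pvFoldl_abs]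
    simp [pvPairSum]
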